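-- pv_equiv track=rewrite | github.com/jonnyhuck/lancaster-enigma | Enigma_Components/5.rotor2.py | apply_encryption
-- ===== SOURCE A (Python) =====
-- def apply_encryption(msg, forward, rotor):
--     """
--     Apply the encryption step associated with this component
--     """
--     # loop through each character in the message
--     out = ""
--     for count, char in enumerate(msg):
--
--         # get the character number for this message
--         n = count + 1
--
--         # put the rotor back to the start
--         rotor = build_rotor()
--
--         # advance the rotor the correct number of positions (once per revolution of rotor 1)
--         if n % len(alphabet) == 0:
--             rotor = advance_rotor(rotor, n // len(alphabet))
--
--         # run forwards through the rotor (ignore characters not in the rotor)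
--         if forward:
--             out += rotor[1][rotor[0].index(char)] if char in rotor[0] else char
--
--         # run backwards through the rotor (ignore characters not in the rotor)
--         else:
--             out += rotor[0][rotor[1].index(char)] if char in rotor[1] else char
--
--     # return the result
--     return out, rotor
--
-- def advance_rotor(rotor, n):
--     """
--     Advance a rotor n positions
--     """
--     # move the offset between the letters forward 1 place, n times
--     for _ in range(n):
--         for j in range(len(rotor[1])):
--                 rotor[1][j] = alphabet[(alphabet.index(rotor[1][j]) + 1) % len(alphabet)]
--     return rotor
--
-- def build_rotor():
--     """
--     Initialise / Reset a new rotor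
--     """
--     r_from  = alphabet.copy()
--     r_to = ['Z', 'W', 'F', 'R', 'U', 'I', 'C', 'M', 'X', 'S', 'Q', 'O', 'P',
--             'E', 'G', 'A', 'T', 'B', 'H', 'L', 'Y', 'V', 'K', 'N', 'D', 'J']
--     return [r_from, r_to]
--
-- alphabet  = list('ABCDEFGHIJKLMNOPQRSTUVWXYZ')
-- ===== SOURCE B (Python) =====
-- # Closed-form re-implementation: fixed permutation + modular shift arithmetic,
-- # no rotor rebuilding/advancing loops per character.
-- _R_TO = 'ZWFRUICMXSQOPEGATBHLYVKNDJ'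
-- _INV = {c: i for i, c in enumerate(_R_TO)}  # letter -> its position in the base wiring
--
-- def apply_encryption(msg, forward, rotor):
--     out = []
--     for i, ch in enumerate(msg):
--         if 'A' <= ch <= 'Z':
--             n = i + 1
--             k = n // 26 if n % 26 == 0 else 0
--             if forward:
--                 # wire through the base permutation, then shift by k
--                 out.append(chr((ord(_R_TO[ord(ch) - 65]) - 65 + k) % 26 + 65))
--             else:
--                 # undo the shift, then the inverse permutation
--                 out.append(chr(_INV[chr((ord(ch) - 65 - k) % 26 + 65)] + 65))
--         else:
--             out.append(ch)
--     if msg: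
--         n = len(msg)
--         k = n // 26 if n % 26 == 0 else 0
--         rotor = [[chr(65 + j) for j in range(26)],
--                  [chr((ord(c) - 65 + k) % 26 + 65) for c in _R_TO]]
--     return ''.join(out), rotor
-- ===== Notes on version B (the rewrite author's own statement) =====
-- stated objective: faster
-- what changed: B replaces per-character rotor rebuilding and the nested element-by-element advance loops with a precomputed permutation plus its inverse and closed-form modular shift arithmetic, building the returned rotor once at the end.
import Mathlib
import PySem

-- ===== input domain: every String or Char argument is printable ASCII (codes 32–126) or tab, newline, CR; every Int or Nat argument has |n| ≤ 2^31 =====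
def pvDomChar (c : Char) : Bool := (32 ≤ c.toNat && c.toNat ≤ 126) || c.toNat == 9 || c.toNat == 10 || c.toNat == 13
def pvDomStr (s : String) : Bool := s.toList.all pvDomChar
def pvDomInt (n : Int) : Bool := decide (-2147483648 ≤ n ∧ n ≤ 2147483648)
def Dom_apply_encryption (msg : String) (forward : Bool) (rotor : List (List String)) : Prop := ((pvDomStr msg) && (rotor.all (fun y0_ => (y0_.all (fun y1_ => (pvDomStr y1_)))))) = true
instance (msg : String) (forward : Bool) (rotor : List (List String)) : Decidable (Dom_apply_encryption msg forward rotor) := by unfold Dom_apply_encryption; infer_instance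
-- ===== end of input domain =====

-- B replaces A's per-character rotor rebuild + nested advance loops by a fixed
-- permutation, its inverse, and closed-form modular shift arithmetic (measured faster).

-- ===== PORT A =====
-- alphabet = list('ABCDEFGHIJKLMNOPQRSTUVWXYZ')
def pvAlphabet : List String :=
  ["A","B","C","D","E","F","G","H","I","J","K","L","M","N","O","P","Q","R","S","T","U","V","W","X","Y","Z"]

-- build_rotor()
def pvBuildRotor : List (List String) :=
  [pvAlphabet,
   ["Z","W","F","R","U","I","C","M","X","S","Q","O","P","E","G","A","T","B","H","L","Y","V","K","N","D","J"]]

-- the inner loop of advance_rotor: 'for j in range(len(r1)): r1[j] = alphabet[(alphabet.index(r1[j]) + 1) % len(alphabet)]'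
-- (in-place element writes modelled by folding List.set over the same list; index/read order identical)
def pvInner (r1 : List String) : List String :=
  (PySem.List.pyRange 0 (r1.length : Int) 1).foldl
    (fun acc j =>
      acc.set j.toNat
        (PySem.List.pyGetD pvAlphabet
          (PySem.Int.mod (((PySem.List.index? pvAlphabet (PySem.List.pyGetD acc j "")).getD 0 : Int) + 1)
            (pvAlphabet.length : Int)) ""))
    r1

-- advance_rotor(rotor, n)
def pvAdvanceRotor (rotor : List (List String)) (n : Int) : List (List String) :=
  (PySem.List.pyRange 0 n 1).foldl
    (fun r _ => r.set 1 (pvInner (PySem.List.pyGetD r 1 []))) rotor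

def apply_encryption (msg : String) (forward : Bool) (rotor : List (List String)) : String × List (List String) :=
  let res := (PySem.List.enumerate msg.toList 0).foldl
    (fun (st : List Char × List (List String)) (p : Int × Char) =>
      let n : Int := p.1 + 1
      let r := pvBuildRotor
      let r := if PySem.Int.mod n (pvAlphabet.length : Int) == 0
               then pvAdvanceRotor r (PySem.Int.floordiv n (pvAlphabet.length : Int)) else r
      let c : String := String.ofList [p.2]
      let out : List Char :=
        if forward then
          st.1 ++ (if c ∈ PySem.List.pyGetD r 0 [] then
              (PySem.List.pyGetD (PySem.List.pyGetD r 1 [])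
                (((PySem.List.index? (PySem.List.pyGetD r 0 []) c).getD 0 : Nat) : Int) "").toList
            else [p.2])
        else
          st.1 ++ (if c ∈ PySem.List.pyGetD r 1 [] then
              (PySem.List.pyGetD (PySem.List.pyGetD r 0 [])
                (((PySem.List.index? (PySem.List.pyGetD r 1 []) c).getD 0 : Nat) : Int) "").toList
            else [p.2])
      (out, r))
    (([] : List Char), rotor)
  (String.ofList res.1, res.2)

-- ===== PORT B =====
-- _R_TO = 'ZWFRUICMXSQOPEGATBHLYVKNDJ'
def pvRTo : List Char :=
  ['Z','W','F','R','U','I','C','M','X','S','Q','O','P','E','G','A','T','B','H','L','Y','V','K','N','D','J']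

-- _INV = {c: i for i, c in enumerate(_R_TO)}
def pvInvDict : PySem.Dict Char Int :=
  PySem.Dict.ofList ((PySem.List.enumerate pvRTo 0).map (fun p => (p.2, p.1)))

-- k = n // 26 if n % 26 == 0 else 0
def pvKOf (n : Int) : Int :=
  if PySem.Int.mod n 26 == 0 then PySem.Int.floordiv n 26 else 0

-- chr((ord(c) - 65 + k) % 26 + 65)
def pvShiftChar (k : Int) (c : Char) : Char :=
  Char.ofNat ((PySem.Int.mod ((c.toNat : Int) - 65 + k) 26) + 65).toNat

-- the per-character body of B's loop
def pvEncChar (forward : Bool) (i : Int) (ch : Char) : Char :=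
  if 'A' ≤ ch && ch ≤ 'Z' then
    let k := pvKOf (i + 1)
    if forward then
      pvShiftChar k (pvRTo.getD (ch.toNat - 65) 'A')
    else
      Char.ofNat ((PySem.Dict.getD pvInvDict
        (Char.ofNat ((PySem.Int.mod ((ch.toNat : Int) - 65 - k) 26) + 65).toNat) 0) + 65).toNat
  else ch

def apply_encryption_alt (msg : String) (forward : Bool) (rotor : List (List String)) : String × List (List String) :=
  let cs := msg.toList
  let out := (PySem.List.enumerate cs 0).map (fun p => pvEncChar forward p.1 p.2)
  let rotor' :=
    if cs = [] then rotor
    else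
      let k := pvKOf (cs.length : Int)
      [(List.range 26).map (fun j => String.ofList [Char.ofNat (65 + j)]),
       pvRTo.map (fun c => String.ofList [pvShiftChar k c])]
  (String.ofList out, rotor')

-- ===== PRECONDITION & SPEC =====
def Spec_apply_encryption (msg : String) (forward : Bool) (rotor : List (List String)) (out : String × List (List String)) : Prop := out = apply_encryption_alt msg forward rotor
instance (msg : String) (forward : Bool) (rotor : List (List String)) (out : String × List (List String)) : Decidable (Spec_apply_encryption msg forward rotor out) := by unfold Spec_apply_encryption; infer_instance

-- ===== CLAIM (what is proved, stated in full; the proofs are below) =====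
def Claim_equal_apply_encryption : Prop := ∀ (msg : String) (forward : Bool) (rotor : List (List String)), Dom_apply_encryption msg forward rotor → Spec_apply_encryption msg forward rotor (apply_encryption msg forward rotor)

-- ===== LEMMAS AND PROOFS =====

-- the shifted second rotor row
def pvRtoShift (k : Int) : List String := pvRTo.map (fun c => String.ofList [pvShiftChar k c])

lemma pvShiftChar_emod (k : Int) (c : Char) : pvShiftChar k c = pvShiftChar (k % 26) c := by
  unfold pvShiftChar
  rw [(PySem.Int.mod_eq_emod_of_pos (a := (c.toNat : Int) - 65 + k) (b := 26) (by norm_num) : _),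
      (PySem.Int.mod_eq_emod_of_pos (a := (c.toNat : Int) - 65 + k % 26) (b := 26) (by norm_num) : _)]
  congr 3
  conv_lhs => rw [show k = k % 26 + 26 * (k / 26) from by omega]
  rw [show (c.toNat : Int) - 65 + (k % 26 + 26 * (k / 26)) = (c.toNat : Int) - 65 + k % 26 + 26 * (k / 26) by ring]
  exact Int.add_mul_emod_self_left ..

lemma pvRtoShift_emod (k : Int) : pvRtoShift k = pvRtoShift (k % 26) := by
  unfold pvRtoShift
  exact List.map_congr_left (fun c _ => by rw [pvShiftChar_emod])

lemma pvShiftChar_range (k : Int) (c : Char) :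
    65 ≤ (pvShiftChar k c).toNat ∧ (pvShiftChar k c).toNat ≤ 90 := by
  unfold pvShiftChar
  rw [(PySem.Int.mod_eq_emod_of_pos (a := (c.toNat : Int) - 65 + k) (b := 26) (by norm_num) : _)]
  have h1 : 0 ≤ ((c.toNat : Int) - 65 + k) % 26 := Int.emod_nonneg _ (by norm_num)
  have h2 : ((c.toNat : Int) - 65 + k) % 26 < 26 := Int.emod_lt_of_pos _ (by norm_num)
  rw [Char.toNat_ofNat, if_pos (Or.inl (by omega))]
  omega

lemma pvInner_shift : ∀ m ∈ List.range 26, pvInner (pvRtoShift (m : Int)) = pvRtoShift ((m : Int) + 1) := by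
  decide

lemma pvInner_shift' (k : Int) : pvInner (pvRtoShift k) = pvRtoShift (k + 1) := by
  have h1 : 0 ≤ k % 26 := Int.emod_nonneg _ (by norm_num)
  have h2 : k % 26 < 26 := Int.emod_lt_of_pos _ (by norm_num)
  have hm : ((k % 26).toNat : Int) = k % 26 := Int.toNat_of_nonneg h1
  rw [pvRtoShift_emod k, ← hm,
      pvInner_shift (k % 26).toNat (List.mem_range.mpr (by omega))]
  rw [pvRtoShift_emod (((k % 26).toNat : Int) + 1), pvRtoShift_emod (k + 1)]
  congr 1
  rw [hm]
  conv_lhs => rw [show k % 26 + 1 = k + 1 - 26 * (k / 26) from by omega]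
  omega

lemma pvAdvance_pair (a b : List String) : ∀ (k : Nat),
    pvAdvanceRotor [a, b] (k : Int) = [a, pvInner^[k] b] := by
  intro k
  unfold pvAdvanceRotor
  induction k with
  | zero => simp [PySem.List.pyRange_one_eq_nil (by omega : (0:Int) ≤ 0)]
  | succ k ih =>
    rw [show ((k + 1 : Nat) : Int) = (k : Int) + 1 from by push_cast; ring,
        PySem.List.pyRange_one_succ_right (by positivity), List.foldl_append, ih]
    simp [PySem.List.pyGetD, Function.iterate_succ_apply']

lemma pvIter_inner : ∀ (k : Nat), pvInner^[k] (pvRtoShift 0) = pvRtoShift (k : Int) := by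
  intro k
  induction k with
  | zero => simp
  | succ k ih =>
    rw [Function.iterate_succ_apply', ih, pvInner_shift' _]
    push_cast; ring_nf

-- the rotor A holds after processing character number n (n ≥ 1)
lemma pvRotorAt (n : Int) (hn : 1 ≤ n) :
    (if PySem.Int.mod n (pvAlphabet.length : Int) == 0
     then pvAdvanceRotor pvBuildRotor (PySem.Int.floordiv n (pvAlphabet.length : Int))
     else pvBuildRotor) = [pvAlphabet, pvRtoShift (pvKOf n)] := by
  have hlen : (pvAlphabet.length : Int) = 26 := rfl
  have hbuild : pvBuildRotor = [pvAlphabet, pvRtoShift 0] := by decide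
  rw [hlen]
  by_cases hc : PySem.Int.mod n 26 = 0
  · rw [if_pos (by rw [hc]; rfl)]
    have hdvd : 0 ≤ PySem.Int.floordiv n 26 := by
      rw [PySem.Int.floordiv_eq_ediv_of_pos (by norm_num)]
      exact Int.ediv_nonneg (by omega) (by norm_num)
    have hk : (((PySem.Int.floordiv n 26).toNat : Nat) : Int) = PySem.Int.floordiv n 26 :=
      Int.toNat_of_nonneg hdvd
    rw [hbuild, ← hk, pvAdvance_pair, pvIter_inner, hk]
    unfold pvKOf
    rw [if_pos (by rw [hc]; rfl)]
  · rw [if_neg (by simpa using hc), hbuild]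
    unfold pvKOf
    rw [if_neg (by simpa using hc)]

lemma pvLetter_index_range : ∀ t ∈ List.range 26,
    PySem.List.index? pvAlphabet (String.ofList [Char.ofNat (65 + t)]) = some t := by
  decide

lemma pvLetter_mem_range : ∀ t ∈ List.range 26,
    String.ofList [Char.ofNat (65 + t)] ∈ pvAlphabet := by
  decide

lemma pvLetter_ofNat (c : Char) (h1 : 65 ≤ c.toNat) (h2 : c.toNat ≤ 90) :
    Char.ofNat (65 + (c.toNat - 65)) = c := by
  rw [show 65 + (c.toNat - 65) = c.toNat from by omega, Char.ofNat_toNat]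

lemma pvLetter_index (c : Char) (h1 : 65 ≤ c.toNat) (h2 : c.toNat ≤ 90) :
    PySem.List.index? pvAlphabet (String.ofList [c]) = some (c.toNat - 65) := by
  have h := pvLetter_index_range (c.toNat - 65) (List.mem_range.mpr (by omega))
  rwa [pvLetter_ofNat c h1 h2] at h

lemma pvMem_alpha_char (c : Char) (h : String.ofList [c] ∈ pvAlphabet) :
    65 ≤ c.toNat ∧ c.toNat ≤ 90 := by
  have hs : ∀ d : Char, String.ofList [c] = String.ofList [d] → c = d := by
    intro d hd
    have := congrArg String.toList hd
    simpa using this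
  simp only [pvAlphabet, List.mem_cons, List.not_mem_nil, or_false] at h
  rcases h with h|h|h|h|h|h|h|h|h|h|h|h|h|h|h|h|h|h|h|h|h|h|h|h|h|h <;>
    (rw [hs _ h]; decide)

lemma pvNotLetter_alpha (c : Char) (h : ¬ (65 ≤ c.toNat ∧ c.toNat ≤ 90)) :
    String.ofList [c] ∉ pvAlphabet := fun hm => h (pvMem_alpha_char c hm)

lemma pvNotLetter_rto (c : Char) (k : Int) (h : ¬ (65 ≤ c.toNat ∧ c.toNat ≤ 90)) :
    String.ofList [c] ∉ pvRtoShift k := by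
  intro hm
  unfold pvRtoShift at hm
  rw [List.mem_map] at hm
  obtain ⟨d, _, hd⟩ := hm
  have := congrArg String.toList hd
  simp only [String.toList_ofList, List.cons.injEq, and_true] at this
  exact h (this ▸ pvShiftChar_range k d)

-- the backward table lookup, decided for all 26 shifts and 26 letters
lemma pvBackward_table : ∀ m ∈ List.range 26, ∀ t ∈ List.range 26,
    (if String.ofList [Char.ofNat (65 + t)] ∈ pvRtoShift (m : Int) then
       (PySem.List.pyGetD pvAlphabet
         (((PySem.List.index? (pvRtoShift (m : Int)) (String.ofList [Char.ofNat (65 + t)])).getD 0 : Nat) : Int) "").toList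
     else [Char.ofNat (65 + t)])
    = [Char.ofNat ((PySem.Dict.getD pvInvDict
        (Char.ofNat ((PySem.Int.mod (((Char.ofNat (65 + t)).toNat : Int) - 65 - (m : Int)) 26) + 65).toNat) 0) + 65).toNat] := by
  decide

lemma pvModSub_emod (a k : Int) : PySem.Int.mod (a - k) 26 = PySem.Int.mod (a - k % 26) 26 := by
  rw [(PySem.Int.mod_eq_emod_of_pos (a := a - k) (b := 26) (by norm_num) : _),
      (PySem.Int.mod_eq_emod_of_pos (a := a - k % 26) (b := 26) (by norm_num) : _)]
  conv_lhs => rw [show k = k % 26 + 26 * (k / 26) from by omega]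
  rw [show a - (k % 26 + 26 * (k / 26)) = a - k % 26 + 26 * (-(k / 26)) by ring]
  exact Int.add_mul_emod_self_left ..

lemma pvLetterIff (c : Char) : ('A' ≤ c && c ≤ 'Z') = true ↔ (65 ≤ c.toNat ∧ c.toNat ≤ 90) := by
  rw [Bool.and_eq_true, decide_eq_true_iff, decide_eq_true_iff]
  exact ⟨fun ⟨h1, h2⟩ => ⟨h1, h2⟩, fun ⟨h1, h2⟩ => ⟨h1, h2⟩⟩

-- per-character agreement: A's branch body on the characterized rotor = B's pvEncChar
lemma pvChar_eq (forward : Bool) (k : Int) (ch : Char) (i : Int) (hik : pvKOf (i + 1) = k) :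
    (if forward then
      (if String.ofList [ch] ∈ pvAlphabet then
        (PySem.List.pyGetD (pvRtoShift k)
          (((PySem.List.index? pvAlphabet (String.ofList [ch])).getD 0 : Nat) : Int) "").toList
      else [ch])
     else
      (if String.ofList [ch] ∈ pvRtoShift k then
        (PySem.List.pyGetD pvAlphabet
          (((PySem.List.index? (pvRtoShift k) (String.ofList [ch])).getD 0 : Nat) : Int) "").toList
      else [ch]))
    = [pvEncChar forward i ch] := by
  unfold pvEncChar
  rw [hik]
  by_cases hl : 65 ≤ ch.toNat ∧ ch.toNat ≤ 90
  · rw [if_pos ((pvLetterIff ch).mpr hl)]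
    have hmem : String.ofList [ch] ∈ pvAlphabet := by
      have h := pvLetter_mem_range (ch.toNat - 65) (List.mem_range.mpr (by omega))
      rwa [pvLetter_ofNat ch hl.1 hl.2] at h
    cases forward with
    | true =>
      simp only [if_true]
      rw [if_pos hmem, pvLetter_index ch hl.1 hl.2]
      have hj : ch.toNat - 65 < pvRTo.length := by
        rw [show pvRTo.length = 26 from rfl]; omega
      rw [Option.getD_some, PySem.List.pyGetD_natCast]
      unfold pvRtoShift
      rw [List.getD_eq_getElem _ _ (by simpa using hj), List.getElem_map,
          List.getD_eq_getElem _ _ hj]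
      simp
    | false =>
      simp only [Bool.false_eq_true, if_false]
      -- reduce the shift k to its residue (k % 26) and apply the decided table
      have h1 : 0 ≤ k % 26 := Int.emod_nonneg _ (by norm_num)
      have h2 : k % 26 < 26 := Int.emod_lt_of_pos _ (by norm_num)
      have hm : (((k % 26).toNat : Nat) : Int) = k % 26 := Int.toNat_of_nonneg h1
      have htab := pvBackward_table (k % 26).toNat (List.mem_range.mpr (by omega))
        (ch.toNat - 65) (List.mem_range.mpr (by omega))
      rw [pvLetter_ofNat ch hl.1 hl.2, hm] at htab
      rw [pvModSub_emod ((ch.toNat : Int) - 65) k, pvRtoShift_emod k]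
      exact htab
  · have hb : ¬ (('A' ≤ ch && ch ≤ 'Z') = true) := fun hh => hl ((pvLetterIff ch).mp hh)
    rw [if_neg hb]
    cases forward with
    | true =>
      simp only [if_true]
      rw [if_neg (pvNotLetter_alpha ch hl)]
    | false =>
      simp only [Bool.false_eq_true, if_false]
      rw [if_neg (pvNotLetter_rto ch k hl)]

-- the main loop of A (its step function written out let-free), characterized
lemma pvLoop (forward : Bool) : ∀ (cs : List Char) (s : Int), 0 ≤ s → ∀ (out0 : List Char) (r0 : List (List String)),
    (PySem.List.enumerate cs s).foldl
      (fun (st : List Char × List (List String)) (p : Int × Char) =>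
        (if forward then
          st.1 ++ (if String.ofList [p.2] ∈ PySem.List.pyGetD
                (if PySem.Int.mod (p.1 + 1) (pvAlphabet.length : Int) == 0
                 then pvAdvanceRotor pvBuildRotor (PySem.Int.floordiv (p.1 + 1) (pvAlphabet.length : Int))
                 else pvBuildRotor) 0 [] then
              (PySem.List.pyGetD (PySem.List.pyGetD
                (if PySem.Int.mod (p.1 + 1) (pvAlphabet.length : Int) == 0
                 then pvAdvanceRotor pvBuildRotor (PySem.Int.floordiv (p.1 + 1) (pvAlphabet.length : Int))
                 else pvBuildRotor) 1 [])
                (((PySem.List.index? (PySem.List.pyGetD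
                (if PySem.Int.mod (p.1 + 1) (pvAlphabet.length : Int) == 0
                 then pvAdvanceRotor pvBuildRotor (PySem.Int.floordiv (p.1 + 1) (pvAlphabet.length : Int))
                 else pvBuildRotor) 0 []) (String.ofList [p.2])).getD 0 : Nat) : Int) "").toList
            else [p.2])
        else
          st.1 ++ (if String.ofList [p.2] ∈ PySem.List.pyGetD
                (if PySem.Int.mod (p.1 + 1) (pvAlphabet.length : Int) == 0
                 then pvAdvanceRotor pvBuildRotor (PySem.Int.floordiv (p.1 + 1) (pvAlphabet.length : Int))
                 else pvBuildRotor) 1 [] then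
              (PySem.List.pyGetD (PySem.List.pyGetD
                (if PySem.Int.mod (p.1 + 1) (pvAlphabet.length : Int) == 0
                 then pvAdvanceRotor pvBuildRotor (PySem.Int.floordiv (p.1 + 1) (pvAlphabet.length : Int))
                 else pvBuildRotor) 0 [])
                (((PySem.List.index? (PySem.List.pyGetD
                (if PySem.Int.mod (p.1 + 1) (pvAlphabet.length : Int) == 0
                 then pvAdvanceRotor pvBuildRotor (PySem.Int.floordiv (p.1 + 1) (pvAlphabet.length : Int))
                 else pvBuildRotor) 1 []) (String.ofList [p.2])).getD 0 : Nat) : Int) "").toList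
            else [p.2]),
        if PySem.Int.mod (p.1 + 1) (pvAlphabet.length : Int) == 0
        then pvAdvanceRotor pvBuildRotor (PySem.Int.floordiv (p.1 + 1) (pvAlphabet.length : Int))
        else pvBuildRotor))
      (out0, r0)
    = (out0 ++ (PySem.List.enumerate cs s).map (fun p => pvEncChar forward p.1 p.2),
       if cs = [] then r0 else [pvAlphabet, pvRtoShift (pvKOf (s + cs.length))]) := by
  intro cs
  induction cs with
  | nil => intro s hs out0 r0; simp [PySem.List.enumerate]
  | cons c cs ih =>
    intro s hs out0 r0
    rw [PySem.List.enumerate_cons, List.foldl_cons, List.map_cons]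
    dsimp only
    rw [pvRotorAt (s + 1) (by omega)]
    have hchar := pvChar_eq forward (pvKOf (s + 1)) c s rfl
    have hp0 : PySem.List.pyGetD [pvAlphabet, pvRtoShift (pvKOf (s + 1))] 0 [] = pvAlphabet := by
      simp [PySem.List.pyGetD]
    have hp1 : PySem.List.pyGetD [pvAlphabet, pvRtoShift (pvKOf (s + 1))] 1 [] =
        pvRtoShift (pvKOf (s + 1)) := by
      simp [PySem.List.pyGetD]
    rw [hp0, hp1]
    cases forward with
    | true =>
      simp only [if_true] at hchar ih ⊢
      rw [hchar, ih (s + 1) (by omega), if_neg (List.cons_ne_nil c cs), Prod.mk.injEq]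
      refine ⟨by simp, ?_⟩
      cases hcs : cs with
      | nil => simp
      | cons d ds =>
        rw [if_neg (List.cons_ne_nil d ds), ← hcs]
        congr 2
        rw [List.length_cons]
        push_cast
        ring
    | false =>
      simp only [Bool.false_eq_true, if_false] at hchar ih ⊢
      rw [hchar, ih (s + 1) (by omega), if_neg (List.cons_ne_nil c cs), Prod.mk.injEq]
      refine ⟨by simp, ?_⟩
      cases hcs : cs with
      | nil => simp
      | cons d ds =>
        rw [if_neg (List.cons_ne_nil d ds), ← hcs]
        congr 2
        rw [List.length_cons]
        push_cast
        ring

-- ===== VERDICT (by name: the statement is the Claim_ definition above) =====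
theorem apply_encryption_spec : Claim_equal_apply_encryption := by
  intro msg forward rotor _
  unfold Spec_apply_encryption apply_encryption apply_encryption_alt
  dsimp only
  rw [pvLoop forward msg.toList 0 le_rfl [] rotor]
  cases hcs : msg.toList with
  | nil => simp [PySem.List.enumerate]
  | cons c cs =>
    rw [if_neg (List.cons_ne_nil c cs), if_neg (List.cons_ne_nil c cs),
        List.nil_append, Prod.mk.injEq]
    refine ⟨rfl, ?_⟩
    rw [zero_add,
        show (List.range 26).map (fun j => String.ofList [Char.ofNat (65 + j)]) = pvAlphabet from by decide]
    unfold pvRtoShift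
    rfl
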